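-- pv_equiv track=rewrite | github.com/PetarMihailov/Softuni_Python | Fundamentals/Lists_Advanced/More_Exercise/battle_ships.py | count_destroyed_ships
-- ===== SOURCE A (Python) =====
-- def count_destroyed_ships(field, attacks):
--     destroyed_ships = 0
--
--     # Process each attack
--     for attack in attacks:
--         row, col = map(int, attack.split('-'))
--         # If there's a ship at the attacked position
--         if field[row][col] > 0:
--             field[row][col] -= 1
--             # Check if the ship is destroyed
--             if field[row][col] == 0:
--                 destroyed_ships += 1
--
--     return destroyed_ships
-- ===== SOURCE B (Python) =====
-- def count_destroyed_ships(field, attacks):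
--     # Tally attacks per cell first, then judge every grid cell once.
--     # (Note: unlike the original, this does not mutate `field`; the return value is identical.)
--     hits = {}
--     for attack in attacks:
--         row, col = map(int, attack.split('-'))
--         hits[(row, col)] = hits.get((row, col), 0) + 1
--     destroyed = 0
--     for r, row_vals in enumerate(field):
--         for c, v in enumerate(row_vals):
--             if v > 0 and hits.get((r, c), 0) >= v:
--                 destroyed += 1
--     return destroyed
-- ===== Notes on version B (the rewrite author's own statement) =====
-- stated objective: alternative
-- what changed: Instead of replaying attacks sequentially while mutating the field, B tallies attacks per cell in one dict pass and then scans the grid once, counting a cell as destroyed iff its positive value is at most its hit count (B does not mutate field; the return value is identical).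
import Mathlib
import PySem

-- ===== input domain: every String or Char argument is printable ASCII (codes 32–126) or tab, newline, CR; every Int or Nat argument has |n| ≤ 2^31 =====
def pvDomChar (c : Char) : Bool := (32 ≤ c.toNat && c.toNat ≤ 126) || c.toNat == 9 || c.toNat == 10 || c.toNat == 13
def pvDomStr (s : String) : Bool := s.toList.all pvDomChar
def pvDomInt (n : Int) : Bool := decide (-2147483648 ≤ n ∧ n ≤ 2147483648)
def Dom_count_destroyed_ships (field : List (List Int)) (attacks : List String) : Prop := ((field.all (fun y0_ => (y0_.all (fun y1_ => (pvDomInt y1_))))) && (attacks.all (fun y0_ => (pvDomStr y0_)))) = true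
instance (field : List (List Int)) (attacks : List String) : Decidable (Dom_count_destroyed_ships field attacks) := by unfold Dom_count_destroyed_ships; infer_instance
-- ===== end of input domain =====

-- B groups attacks per cell (a Counter dict) and then judges every grid cell once, instead of
-- A's sequential replay of the attacks that mutates the field.  Equivalence is about the RETURN
-- value only: Python A decrements field in place, Python B leaves field untouched.

-- ===== PORT A =====

-- shared parsing helper: `row, col = map(int, attack.split('-'))`
-- (none exactly where that Python line raises: wrong number of parts, or int() fails)
def pvParse (s : String) : Option (Int × Int) :=
  match PySem.Str.split? s "-" with
  | some [a, b] =>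
    match PySem.Int.ofStr? a, PySem.Int.ofStr? b with
    | some r, some c => some (r, c)
    | _, _ => none
  | _ => none

-- body of A's loop once (row, col) are parsed.  A successfully parsed index is never negative
-- (no '-' can occur inside a piece of split('-')), so `field[row][col] = …` is `List.set` on
-- r.toNat/c.toNat; on out-of-range indices Python raises (pyGet? = none) and we leave the state.
def pvStepRC (st : List (List Int) × Int) (rc : Int × Int) : List (List Int) × Int :=
  match PySem.List.pyGet? st.1 rc.1 with
  | none => st
  | some row =>
    match PySem.List.pyGet? row rc.2 with
    | none => st
    | some v =>
      if v > 0 then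
        (st.1.set rc.1.toNat (row.set rc.2.toNat (v - 1)),
         if v - 1 = 0 then st.2 + 1 else st.2)
      else st

def count_destroyed_ships (field : List (List Int)) (attacks : List String) : Int :=
  (attacks.foldl
    (fun st attack =>
      match pvParse attack with
      | none => st
      | some rc => pvStepRC st rc)
    (field, 0)).2

-- ===== PORT B =====

def count_destroyed_ships_alt (field : List (List Int)) (attacks : List String) : Int :=
  let hits : PySem.Dict (Int × Int) Int :=
    attacks.foldl
      (fun d attack =>
        match pvParse attack with
        | none => d
        | some rc => d.insert rc (d.getD rc 0 + 1))
      PySem.Dict.empty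
  (PySem.List.enumerate field 0).foldl
    (fun acc p =>
      (PySem.List.enumerate p.2 0).foldl
        (fun acc2 q => if q.2 > 0 ∧ hits.getD (p.1, q.1) 0 ≥ q.2 then acc2 + 1 else acc2)
        acc)
    0

-- ===== PRECONDITION & SPEC =====

-- one attack is acceptable for A against this field: it parses and its indices are in range
def pvOk (field : List (List Int)) (a : String) : Bool :=
  match pvParse a with
  | some (r, c) =>
      decide (0 ≤ r) && decide (r.toNat < field.length) &&
      decide (0 ≤ c) && decide (c.toNat < (field.getD r.toNat []).length)
  | none => false

-- exactly the inputs where Python A returns: every attack parses as 'r-c' and hits an existing cell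
def Pre_count_destroyed_ships (field : List (List Int)) (attacks : List String) : Prop :=
  ∀ a ∈ attacks, pvOk field a = true
instance (field : List (List Int)) (attacks : List String) : Decidable (Pre_count_destroyed_ships field attacks) := by unfold Pre_count_destroyed_ships; infer_instance

def pvWitness_count_destroyed_ships : List (List Int) × List String :=
  ([[2, 0], [1, 3]], ["0-0", "1-1", "0-0"])

def Spec_count_destroyed_ships (field : List (List Int)) (attacks : List String) (out : Int) : Prop := out = count_destroyed_ships_alt field attacks
instance (field : List (List Int)) (attacks : List String) (out : Int) : Decidable (Spec_count_destroyed_ships field attacks out) := by unfold Spec_count_destroyed_ships; infer_instance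

-- ===== CLAIM (what is proved, stated in full; the proofs are below) =====
def Claim_equal_count_destroyed_ships : Prop := ∀ (field : List (List Int)) (attacks : List String), Dom_count_destroyed_ships field attacks → Pre_count_destroyed_ships field attacks → Spec_count_destroyed_ships field attacks (count_destroyed_ships field attacks)

-- ===== LEMMAS AND PROOFS =====

-- abstract count of destroyed cells: for the grid rows starting at row index r (cells of a row
-- indexed from column c), with ps the list of parsed attacks
def pvRowN (ps : List (Int × Int)) (r : Int) : Int → List Int → Int
  | _, [] => 0
  | c, v :: vs =>
      (if v > 0 ∧ (ps.count (r, c) : Int) ≥ v then 1 else 0) + pvRowN ps r (c + 1) vs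

def pvGridN (ps : List (Int × Int)) : Int → List (List Int) → Int
  | _, [] => 0
  | r, row :: rows => pvRowN ps r 0 row + pvGridN ps (r + 1) rows

-- a fold that skips non-parsing attacks is a fold over the parsed pairs
theorem pv_foldl_parse {β : Type} (g : β → (Int × Int) → β) (as : List String) (init : β) :
    as.foldl (fun d a => match pvParse a with | none => d | some rc => g d rc) init
      = (as.filterMap pvParse).foldl g init := by
  induction as generalizing init with
  | nil => rfl
  | cons a as ih =>
    cases h : pvParse a <;> simp [List.foldl_cons, h, ih]

-- ---- B equals pvGridN ----

theorem pv_rowFold (ps : List (Int × Int)) (r : Int) (row : List Int) :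
    ∀ (c acc : Int),
      (PySem.List.enumerate row c).foldl
        (fun acc2 q => if q.2 > 0 ∧ ((ps.count (r, q.1) : Int)) ≥ q.2 then acc2 + 1 else acc2)
        acc
      = acc + pvRowN ps r c row := by
  induction row with
  | nil => intro c acc; simp [PySem.List.enumerate_nil, pvRowN]
  | cons v vs ih =>
    intro c acc
    rw [PySem.List.enumerate_cons, List.foldl_cons, ih, pvRowN]
    split <;> ring

theorem pv_gridFold (ps : List (Int × Int)) (rows : List (List Int)) :
    ∀ (r acc : Int),
      (PySem.List.enumerate rows r).foldl
        (fun acc p =>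
          (PySem.List.enumerate p.2 0).foldl
            (fun acc2 q => if q.2 > 0 ∧ ((ps.count (p.1, q.1) : Int)) ≥ q.2 then acc2 + 1 else acc2)
            acc)
        acc
      = acc + pvGridN ps r rows := by
  induction rows with
  | nil => intro r acc; simp [PySem.List.enumerate_nil, pvGridN]
  | cons row rows ih =>
    intro r acc
    rw [PySem.List.enumerate_cons, List.foldl_cons, pv_rowFold, ih, pvGridN]
    ring

theorem pv_alt_eq_gridN (field : List (List Int)) (attacks : List String) :
    count_destroyed_ships_alt field attacks = pvGridN (attacks.filterMap pvParse) 0 field := by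
  simp only [count_destroyed_ships_alt]
  rw [pv_foldl_parse (fun (d : PySem.Dict (Int × Int) Int) rc => d.insert rc (d.getD rc 0 + 1)) attacks PySem.Dict.empty,
      PySem.Dict.foldl_insert_getD_add_one_eq_counter]
  simp only [PySem.Dict.getD_counter]
  rw [pv_gridFold]
  ring

-- ---- pvGridN under one attack ----

-- cells other than (r, c): the head attack does not change their count
theorem pv_rowN_cons_ne (r c : Int) (ps : List (Int × Int)) (R : List Int) :
    ∀ (r0 c0 : Int), (r0 ≠ r ∨ c < c0) →
      pvRowN ((r, c) :: ps) r0 c0 R = pvRowN ps r0 c0 R := by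
  induction R with
  | nil => intro r0 c0 _; rfl
  | cons v vs ih =>
    intro r0 c0 h
    have hne : ((r, c) : Int × Int) ≠ (r0, c0) := by
      rcases h with h | h
      · exact fun he => h (congrArg Prod.fst he).symm
      · exact fun he => by have h2 := congrArg Prod.snd he; simp only at h2; omega
    rw [pvRowN, pvRowN, List.count_cons_of_ne hne,
        ih r0 (c0 + 1) (by rcases h with h | h; exacts [Or.inl h, Or.inr (by omega)])]

theorem pv_gridN_cons_lt (r c : Int) (ps : List (Int × Int)) (rows : List (List Int)) :
    ∀ (r0 : Int), r < r0 →
      pvGridN ((r, c) :: ps) r0 rows = pvGridN ps r0 rows := by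
  induction rows with
  | nil => intro r0 _; rfl
  | cons row rows ih =>
    intro r0 h
    rw [pvGridN, pvGridN, pv_rowN_cons_ne r c ps row r0 0 (Or.inl (by omega)),
        ih (r0 + 1) (by omega)]

-- the row that is hit: walking to column c
theorem pv_rowN_hit (r c : Int) (ps : List (Int × Int)) (v : Int) (R2 : List Int) :
    ∀ (R1 : List Int) (c0 : Int), c = c0 + (R1.length : Int) →
      pvRowN ((r, c) :: ps) r c0 (R1 ++ v :: R2)
        = (if v > 0 then (if v - 1 = 0 then 1 else 0) else 0)
          + pvRowN ps r c0 (R1 ++ (if v > 0 then v - 1 else v) :: R2) := by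
  intro R1
  induction R1 with
  | nil =>
    intro c0 hc
    have hc0 : c0 = c := by simp only [List.length_nil, Int.natCast_zero, add_zero] at hc; omega
    rw [hc0]
    rw [List.nil_append, List.nil_append, pvRowN, pvRowN,
        List.count_cons_self,
        pv_rowN_cons_ne r c ps R2 r (c + 1) (Or.inr (by omega))]
    have hk : (0 : Int) ≤ (ps.count (r, c) : Int) := Int.natCast_nonneg _
    split_ifs <;> omega
  | cons w R1 ih =>
    intro c0 hc
    have hcw : c < c0 ∨ c > c0 ∨ c = c0 := by omega
    have hgt : c0 < c := by simp only [List.length_cons] at hc; omega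
    rw [List.cons_append, List.cons_append, pvRowN, pvRowN,
        List.count_cons_of_ne (by intro he; have h1 := congrArg Prod.snd he; simp at h1; omega),
        ih (c0 + 1) (by simp only [List.length_cons] at hc; push_cast at hc ⊢; omega)]
    ring

-- the full grid under one attack at (r, c) = (r0 + |F1|, |R1|):
theorem pv_gridN_step (r c : Int) (ps : List (Int × Int)) (v : Int) (R1 R2 : List Int)
    (F2 : List (List Int)) (hc : c = (R1.length : Int)) :
    ∀ (F1 : List (List Int)) (r0 : Int), r = r0 + (F1.length : Int) →
      pvGridN ((r, c) :: ps) r0 (F1 ++ (R1 ++ v :: R2) :: F2)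
        = (if v > 0 then (if v - 1 = 0 then 1 else 0) else 0)
          + pvGridN ps r0 (F1 ++ (R1 ++ (if v > 0 then v - 1 else v) :: R2) :: F2) := by
  intro F1
  induction F1 with
  | nil =>
    intro r0 hr
    have hr0 : r0 = r := by simp only [List.length_nil, Int.natCast_zero, add_zero] at hr; omega
    rw [hr0]
    rw [List.nil_append, List.nil_append, pvGridN, pvGridN,
        pv_rowN_hit r c ps v R2 R1 0 (by omega),
        pv_gridN_cons_lt r c ps F2 (r + 1) (by omega)]
    ring
  | cons x F1 ih =>
    intro r0 hr
    have hgt : r0 < r := by simp only [List.length_cons] at hr; omega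
    rw [List.cons_append, List.cons_append, pvGridN, pvGridN,
        pv_rowN_cons_ne r c ps x r0 0 (Or.inl (by omega)),
        ih (r0 + 1) (by simp only [List.length_cons] at hr; push_cast at hr ⊢; omega)]
    ring

-- with no attacks nothing is destroyed
theorem pv_rowN_nil (r : Int) (R : List Int) : ∀ c, pvRowN [] r c R = 0 := by
  induction R with
  | nil => intro c; rfl
  | cons v vs ih =>
    intro c
    rw [pvRowN, ih]
    have hfalse : ¬ (v > 0 ∧ ((([] : List (Int × Int)).count (r, c) : Int) ≥ v)) := by
      rintro ⟨hv, hge⟩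
      simp only [List.count_nil, Int.natCast_zero] at hge
      omega
    rw [if_neg hfalse]
    ring

theorem pv_gridN_nil (rows : List (List Int)) : ∀ r, pvGridN [] r rows = 0 := by
  induction rows with
  | nil => intro r; rfl
  | cons row rows ih => intro r; rw [pvGridN, pv_rowN_nil, ih]; ring

-- a cell update keeps the shape of the grid
theorem pv_shape_set (field : List (List Int)) (i : Nat) (nr : List Int)
    (hlen : nr.length = (field.getD i []).length) (k : Nat) :
    ((field.set i nr).getD k []).length = (field.getD k []).length := by
  by_cases hk : k = i
  · subst hk
    by_cases hik : k < field.length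
    · rw [List.getD_eq_getElem _ _ (by simpa using hik), List.getElem_set_self, hlen]
    · rw [List.set_eq_of_length_le (by omega)]
  · by_cases hk2 : k < field.length
    · rw [List.getD_eq_getElem _ _ (by simpa using hk2), List.getD_eq_getElem _ _ hk2,
          List.getElem_set_ne (by omega)]
    · rw [List.getD_eq_default _ _ (by simpa using Nat.le_of_not_lt hk2),
          List.getD_eq_default _ _ (Nat.le_of_not_lt hk2)]

-- main loop invariant for A, over the parsed attacks
theorem pv_mainA (ps : List (Int × Int)) :
    ∀ (field : List (List Int)) (d : Int),
      (∀ rc ∈ ps, 0 ≤ rc.1 ∧ rc.1.toNat < field.length ∧ 0 ≤ rc.2 ∧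
        rc.2.toNat < (field.getD rc.1.toNat []).length) →
      (ps.foldl pvStepRC (field, d)).2 = d + pvGridN ps 0 field := by
  induction ps with
  | nil => intro field d _; rw [List.foldl_nil, pv_gridN_nil]; ring
  | cons rc ps ih =>
    intro field d hpre
    obtain ⟨r, c⟩ := rc
    obtain ⟨hr0, hri, hc0, hci⟩ := hpre (r, c) (List.mem_cons_self)
    set i := r.toNat with hi
    set j := c.toNat with hj
    have hrow : field.getD i [] = field[i] := List.getD_eq_getElem _ _ hri
    set row := field[i] with hrowdef
    have hjlt : j < row.length := by rw [← hrow]; exact hci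
    have hget1 : PySem.List.pyGet? field r = some row :=
      PySem.List.pyGet?_eq_some_getElem field hr0 (by omega)
    have hget2 : PySem.List.pyGet? row c = some row[j] :=
      PySem.List.pyGet?_eq_some_getElem row hc0 (by omega)
    set v := row[j] with hv
    -- decompose the grid around the attacked cell
    have hfield : field = field.take i ++ (row.take j ++ v :: row.drop (j + 1)) :: field.drop (i + 1) := by
      conv_lhs => rw [← List.take_append_drop i field, List.drop_eq_getElem_cons hri]
      rw [← hrowdef]
      congr 2
      conv_lhs => rw [← List.take_append_drop j row, List.drop_eq_getElem_cons hjlt]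
    have hlenF1 : (field.take i).length = i := by simp; omega
    have hlenR1 : (row.take j).length = j := by simp; omega
    have hsetrow : row.set j (v - 1) = row.take j ++ (v - 1) :: row.drop (j + 1) :=
      List.set_eq_take_cons_drop _ hjlt
    have hsetfield : field.set i (row.set j (v - 1))
        = field.take i ++ (row.take j ++ (v - 1) :: row.drop (j + 1)) :: field.drop (i + 1) := by
      rw [List.set_eq_take_cons_drop _ hri, hsetrow]
    have hstep : pvStepRC (field, d) (r, c)
        = (if v > 0 then
            (field.set i (row.set j (v - 1)), if v - 1 = 0 then d + 1 else d)
          else (field, d)) := by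
      simp only [pvStepRC, hget1, hget2]
      split <;> rfl
    have hgrid := pv_gridN_step r c ps v (row.take j) (row.drop (j + 1)) (field.drop (i + 1))
        (by rw [hlenR1]; omega) (field.take i) 0 (by rw [hlenF1]; omega)
    rw [List.foldl_cons, hstep]
    by_cases hvpos : v > 0
    · simp only [if_pos hvpos] at hstep ⊢
      have hpre' : ∀ rc' ∈ ps, 0 ≤ rc'.1 ∧ rc'.1.toNat < (field.set i (row.set j (v - 1))).length ∧
          0 ≤ rc'.2 ∧ rc'.2.toNat < ((field.set i (row.set j (v - 1))).getD rc'.1.toNat []).length := by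
        intro rc' hm
        obtain ⟨h1, h2, h3, h4⟩ := hpre rc' (List.mem_cons_of_mem _ hm)
        refine ⟨h1, by simpa using h2, h3, ?_⟩
        rw [pv_shape_set field i (row.set j (v - 1)) (by rw [List.length_set, hrow])]
        exact h4
      rw [ih _ _ hpre']
      conv_rhs => rw [hfield]
      rw [hgrid, hsetfield]
      simp only [if_pos hvpos]
      split <;> ring
    · simp only [if_neg hvpos] at ⊢
      rw [ih _ _ (fun rc' hm => hpre rc' (List.mem_cons_of_mem _ hm))]
      conv_rhs => rw [hfield]
      rw [hgrid]
      simp only [if_neg hvpos]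
      conv_rhs => rw [← hfield]
      ring

-- transfer the precondition to the parsed pairs
theorem pv_pre_filterMap (field : List (List Int)) (attacks : List String)
    (h : Pre_count_destroyed_ships field attacks) :
    ∀ rc ∈ attacks.filterMap pvParse, 0 ≤ rc.1 ∧ rc.1.toNat < field.length ∧ 0 ≤ rc.2 ∧
      rc.2.toNat < (field.getD rc.1.toNat []).length := by
  intro rc hm
  obtain ⟨a, ha, hp⟩ := List.mem_filterMap.mp hm
  have hok := h a ha
  obtain ⟨r, c⟩ := rc
  unfold pvOk at hok
  rw [hp] at hok
  simp only [Bool.and_eq_true, decide_eq_true_eq] at hok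
  exact ⟨hok.1.1.1, hok.1.1.2, hok.1.2, hok.2⟩

-- ===== VERDICT (by name: the statement is the Claim_ definition above) =====
theorem count_destroyed_ships_spec : Claim_equal_count_destroyed_ships := by
  intro field attacks _ hpre
  unfold Spec_count_destroyed_ships
  unfold count_destroyed_ships
  rw [pv_foldl_parse (g := pvStepRC),
      pv_mainA _ field 0 (pv_pre_filterMap field attacks hpre),
      pv_alt_eq_gridN]
  ring
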